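-- pv_equiv track=rewrite | github.com/devnullvoid/pvetui | scripts/post-release-announcement.py | build_announcement_message
-- ===== SOURCE A (Python) =====
-- def build_announcement_message(
--     project: str, tag: str, release_url: str, highlights: list[str], max_len: int = 300
-- ) -> str:
--     base = f"{project} {tag} is out!"
--     tail = f"Full notes: {release_url} #proxmox #linux #homelab"
--
--     if highlights:
--         # Keep highlights concise so we can include at least one line in
--         # constrained post lengths (e.g., Bluesky 300-char limit).
--         compact = []
--         for h in highlights:
--             h = h.strip()
--             if len(h) > 92:
--                 h = h[:89].rstrip() + "..."
--             compact.append(h)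
--
--         for count in range(len(compact), 0, -1):
--             bullet_lines = "\n".join(f"• {h}" for h in compact[:count])
--             candidate = f"{base}\nHighlights:\n{bullet_lines}\n{tail}"
--             if len(candidate) <= max_len:
--                 return candidate
--
--         # If even one compact highlight doesn't fit, try an aggressively short
--         # single-line highlight before falling back to the bare release message.
--         short = compact[0]
--         if len(short) > 56:
--             short = short[:53].rstrip() + "..."
--         candidate = f"{base}\nHighlights:\n• {short}\n{tail}"
--         if len(candidate) <= max_len:
--             return candidate
--
--     candidate = f"{base} {tail}"
--     if len(candidate) <= max_len:
--         return candidate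
--
--     # Keep URL and hashtags; truncate the project prefix as needed.
--     overflow = len(candidate) - max_len
--     shortened_base = base
--     if overflow > 0 and len(shortened_base) > overflow + 3:
--         shortened_base = (
--             shortened_base[: len(shortened_base) - overflow - 3].rstrip() + "..."
--         )
--     return f"{shortened_base} {tail}"
-- ===== SOURCE B (Python) =====
-- def build_announcement_message(
--     project: str, tag: str, release_url: str, highlights: list[str], max_len: int = 300
-- ) -> str:
--     base = f"{project} {tag} is out!"
--     tail = f"Full notes: {release_url} #proxmox #linux #homelab"
--
--     if highlights:
--         compact = []
--         for h in highlights: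
--             h = h.strip()
--             if len(h) > 92:
--                 h = h[:89].rstrip() + "..."
--             compact.append(h)
--
--         # Single pass: the candidate with c bullets has length
--         #   len(base) + len("\nHighlights:\n") + len(tail) + sum_{i<c} (3 + len(compact[i]))
--         # (each bullet costs "• " + text + one separating/terminating newline).
--         # Record the largest c whose total fits, without ever building candidates.
--         total = len(base) + 13 + len(tail)
--         best = 0
--         for i, h in enumerate(compact):
--             total += 3 + len(h)
--             if total <= max_len:
--                 best = i + 1
--         if best > 0:
--             bullets = "\n".join(f"• {h}" for h in compact[:best])
--             return f"{base}\nHighlights:\n{bullets}\n{tail}"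
--
--         short = compact[0]
--         if len(short) > 56:
--             short = short[:53].rstrip() + "..."
--         candidate = f"{base}\nHighlights:\n• {short}\n{tail}"
--         if len(candidate) <= max_len:
--             return candidate
--
--     candidate = f"{base} {tail}"
--     if len(candidate) <= max_len:
--         return candidate
--
--     overflow = len(candidate) - max_len
--     shortened_base = base
--     if overflow > 0 and len(shortened_base) > overflow + 3:
--         shortened_base = (
--             shortened_base[: len(shortened_base) - overflow - 3].rstrip() + "..."
--         )
--     return f"{shortened_base} {tail}"
-- ===== Notes on version B (the rewrite author's own statement) =====
-- stated objective: faster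
-- what changed: A rebuilds and measures a full candidate message for every bullet count (quadratic in the highlights text); B does one linear pass over the compacted highlights accumulating the candidate length arithmetically, picks the largest fitting count, and builds the message once.
import Mathlib
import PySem

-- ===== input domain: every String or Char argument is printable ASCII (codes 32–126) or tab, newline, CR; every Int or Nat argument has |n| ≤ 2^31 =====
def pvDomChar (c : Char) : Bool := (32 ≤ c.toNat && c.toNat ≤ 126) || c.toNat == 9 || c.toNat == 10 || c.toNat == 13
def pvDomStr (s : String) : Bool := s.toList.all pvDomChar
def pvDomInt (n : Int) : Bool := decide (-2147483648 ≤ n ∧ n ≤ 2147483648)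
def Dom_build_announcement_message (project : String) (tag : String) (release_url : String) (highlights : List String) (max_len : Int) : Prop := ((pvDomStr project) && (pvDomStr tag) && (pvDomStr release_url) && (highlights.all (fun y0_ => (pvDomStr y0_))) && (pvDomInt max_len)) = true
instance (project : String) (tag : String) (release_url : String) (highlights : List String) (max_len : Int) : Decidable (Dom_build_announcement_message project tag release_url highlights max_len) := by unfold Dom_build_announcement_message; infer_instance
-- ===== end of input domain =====

-- B replaces A's quadratic "rebuild the whole candidate for every count" loop by one
-- linear pass that tracks the candidate length arithmetically and builds the message once.

-- ===== PORT A =====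
-- shared by both Pythons verbatim: compacting one highlight (strip, truncate at 92 to 89+"...")
def pvCompactOne (h : String) : String :=
  let h := PySem.Str.strip h
  if 92 < PySem.Str.len h then PySem.Str.rstrip (PySem.Str.slice h none (some 89)) ++ "..." else h

-- shared by both Pythons verbatim: the candidate message with the first c bullets
def pvCandidate (base tail : String) (compact : List String) (c : Int) : String :=
  let bullet_lines := PySem.Str.join "\n" ((PySem.List.slice compact none (some c)).map (fun h => "• " ++ h))
  base ++ "\nHighlights:\n" ++ bullet_lines ++ "\n" ++ tail

-- shared by both Pythons verbatim: the code after the highlights block (bare message, truncating base)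
def pvBareFallback (base tail : String) (max_len : Int) : String :=
  let candidate := base ++ " " ++ tail
  if PySem.Str.len candidate ≤ max_len then candidate
  else
    let overflow := PySem.Str.len candidate - max_len
    let shortened_base :=
      if 0 < overflow ∧ overflow + 3 < PySem.Str.len base then
        PySem.Str.rstrip (PySem.Str.slice base none (some (PySem.Str.len base - overflow - 3))) ++ "..."
      else base
    shortened_base ++ " " ++ tail

-- shared by both Pythons verbatim: the aggressively-short single-highlight attempt.
-- compact[0] is ported as headD "": this code only runs with compact nonempty (highlights ≠ [])
def pvShortFallback (base tail : String) (compact : List String) (max_len : Int) : String :=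
  let short := compact.headD ""
  let short := if 56 < PySem.Str.len short then PySem.Str.rstrip (PySem.Str.slice short none (some 53)) ++ "..." else short
  let candidate := base ++ "\nHighlights:\n• " ++ short ++ "\n" ++ tail
  if PySem.Str.len candidate ≤ max_len then candidate
  else pvBareFallback base tail max_len

-- A's descending for-loop over range(len(compact), 0, -1): first fitting candidate
def pvFitLoop (base tail : String) (compact : List String) (max_len : Int) : List Int → Option String
  | [] => none
  | c :: rest =>
    let candidate := pvCandidate base tail compact c
    if PySem.Str.len candidate ≤ max_len then some candidate
    else pvFitLoop base tail compact max_len rest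

def build_announcement_message (project : String) (tag : String) (release_url : String) (highlights : List String) (max_len : Int) : String :=
  let base := project ++ " " ++ tag ++ " is out!"
  let tail := "Full notes: " ++ release_url ++ " #proxmox #linux #homelab"
  if highlights ≠ [] then
    let compact := highlights.map pvCompactOne
    match pvFitLoop base tail compact max_len (PySem.List.pyRange (compact.length : Int) 0 (-1)) with
    | some s => s
    | none => pvShortFallback base tail compact max_len
  else pvBareFallback base tail max_len

-- ===== PORT B =====
-- Source B's single-pass step: total += 3 + len(h); if total <= max_len: best = i + 1
def pvFitState (max_len : Int) (st : Int × Int) (p : Int × String) : Int × Int :=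
  let total := st.1 + 3 + PySem.Str.len p.2
  if total ≤ max_len then (total, p.1 + 1) else (total, st.2)

def build_announcement_message_alt (project : String) (tag : String) (release_url : String) (highlights : List String) (max_len : Int) : String :=
  let base := project ++ " " ++ tag ++ " is out!"
  let tail := "Full notes: " ++ release_url ++ " #proxmox #linux #homelab"
  if highlights ≠ [] then
    let compact := highlights.map pvCompactOne
    let st := (PySem.List.enumerate compact 0).foldl (pvFitState max_len)
      (PySem.Str.len base + 13 + PySem.Str.len tail, 0)
    if 0 < st.2 then pvCandidate base tail compact st.2
    else pvShortFallback base tail compact max_len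
  else pvBareFallback base tail max_len

-- ===== PRECONDITION & SPEC =====
def Spec_build_announcement_message (project : String) (tag : String) (release_url : String) (highlights : List String) (max_len : Int) (out : String) : Prop := out = build_announcement_message_alt project tag release_url highlights max_len
instance (project : String) (tag : String) (release_url : String) (highlights : List String) (max_len : Int) (out : String) : Decidable (Spec_build_announcement_message project tag release_url highlights max_len out) := by unfold Spec_build_announcement_message; infer_instance

-- ===== CLAIM (what is proved, stated in full; the proofs are below) =====
def Claim_equal_build_announcement_message : Prop := ∀ (project : String) (tag : String) (release_url : String) (highlights : List String) (max_len : Int), Dom_build_announcement_message project tag release_url highlights max_len → Spec_build_announcement_message project tag release_url highlights max_len (build_announcement_message project tag release_url highlights max_len)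

-- ===== LEMMAS AND PROOFS =====

-- the arithmetic cost B accumulates per bullet
def pvCost (l : List String) : Int := (l.map (fun h => 3 + PySem.Str.len h)).sum

-- greatest c in 1..n with P c (0 if none) — the common characterisation of both loops
def pvBestN (P : Nat → Bool) : Nat → Nat
  | 0 => 0
  | n+1 => if P (n+1) then n+1 else pvBestN P n

theorem pvBestN_congr (P Q : Nat → Bool) (n : Nat)
    (h : ∀ c, 1 ≤ c → c ≤ n → P c = Q c) : pvBestN P n = pvBestN Q n := by
  induction n with
  | zero => rfl
  | succ n ih =>
    show (if P (n+1) = true then n+1 else pvBestN P n)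
        = (if Q (n+1) = true then n+1 else pvBestN Q n)
    rw [h (n+1) (by omega) (by omega), ih (fun c a b => h c a (by omega))]

theorem pvCost_append (l₁ l₂ : List String) : pvCost (l₁ ++ l₂) = pvCost l₁ + pvCost l₂ := by
  simp [pvCost]

theorem pvCost_eq_natCast (l : List String) :
    pvCost l = ((l.map (fun h => 3 + h.toList.length)).sum : Nat) := by
  induction l with
  | nil => rfl
  | cons h t ih =>
    simp only [pvCost, List.map_cons, List.sum_cons] at *
    rw [ih, PySem.Str.len_eq]
    push_cast
    ring

-- length of "\n".join over a nonempty list of char-lists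
theorem pvJoinLen (parts : List (List Char)) (hne : parts ≠ []) :
    (PySem.Chars.join ['\n'] parts).length = (parts.map List.length).sum + (parts.length - 1) := by
  induction parts with
  | nil => exact absurd rfl hne
  | cons p rest ih =>
    cases rest with
    | nil => simp [PySem.Chars.join_singleton]
    | cons q r =>
      rw [PySem.Chars.join_cons_cons]
      have ihh := ih (by simp)
      simp only [List.length_append, List.map_cons, List.sum_cons, List.length_cons,
        List.length_nil] at ihh ⊢
      omega

-- length formula for the candidate with c ≥ 1 bullets
theorem pvCandidateLen (base tail : String) (compact : List String) (c : Nat)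
    (hc : 1 ≤ c) (hne : compact ≠ []) :
    PySem.Str.len (pvCandidate base tail compact (c : Int)) =
      PySem.Str.len base + 13 + PySem.Str.len tail + pvCost (compact.take c) := by
  have htake : compact.take c ≠ [] := by
    cases compact with
    | nil => exact absurd rfl hne
    | cons a t => cases c with | zero => omega | succ m => simp
  rw [pvCandidate]
  simp only [PySem.List.slice_to_natCast]
  rw [PySem.Str.len_eq, PySem.Str.len_eq, PySem.Str.len_eq, pvCost_eq_natCast]
  simp only [String.toList_append, List.length_append, PySem.Str.toList_join]
  have hsep : ("\n" : String).toList = ['\n'] := rfl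
  rw [hsep, pvJoinLen _ (by simpa using htake)]
  have hmap : ((compact.take c).map (fun h => "• " ++ h)).map String.toList
      = (compact.take c).map (fun h => "• ".toList ++ h.toList) := by
    rw [List.map_map]
    apply List.map_congr_left
    intro h _
    simp [String.toList_append]
  rw [hmap]
  have hlen2 : (((compact.take c).map (fun h => "• ".toList ++ h.toList)).map List.length).sum
      = ((compact.take c).map (fun h => 2 + h.toList.length)).sum := by
    rw [List.map_map]
    apply congrArg
    apply List.map_congr_left
    intro h _
    simp [List.length_append]
    omega
  rw [hlen2]
  have hm : ((compact.take c).map (fun h => 3 + h.toList.length)).sum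
      = ((compact.take c).map (fun h => 2 + h.toList.length)).sum + (compact.take c).length := by
    induction (compact.take c) with
    | nil => rfl
    | cons a t iht => simp only [List.map_cons, List.sum_cons, List.length_cons] at *; omega
  have hpos : 1 ≤ (compact.take c).length := by
    cases htk : compact.take c with
    | nil => exact absurd htk htake
    | cons a t => simp
  simp only [List.length_map] at *
  have hsl : (['\n'] : List Char).length = 1 := rfl
  have hNH : ("\nHighlights:\n" : String).toList.length = 13 := by decide
  rw [hsl, hNH]
  omega

-- A's descending loop finds the candidate for the greatest fitting count
theorem pvFitLoop_eq (base tail : String) (compact : List String) (max_len : Int) (n : Nat) :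
    pvFitLoop base tail compact max_len (PySem.List.pyRange (n : Int) 0 (-1)) =
      (if pvBestN (fun c => decide (PySem.Str.len (pvCandidate base tail compact (c : Int)) ≤ max_len)) n = 0
       then none
       else some (pvCandidate base tail compact
         ((pvBestN (fun c => decide (PySem.Str.len (pvCandidate base tail compact (c : Int)) ≤ max_len)) n : Nat) : Int))) := by
  set P : Nat → Bool := fun c => decide (PySem.Str.len (pvCandidate base tail compact (c : Int)) ≤ max_len) with hP
  induction n with
  | zero =>
    rw [PySem.List.pyRange_neg_one_eq_nil (by norm_num)]
    rfl
  | succ n ih =>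
    have harg : ((n+1 : Nat) : Int) - 1 = (n : Int) := by push_cast; ring
    rw [PySem.List.pyRange_neg_one_cons (by push_cast; omega), harg]
    simp only [pvFitLoop]
    by_cases hfit : PySem.Str.len (pvCandidate base tail compact ((n+1 : Nat) : Int)) ≤ max_len
    · rw [if_pos hfit]
      have hb : pvBestN P (n+1) = n+1 := by
        show (if P (n+1) = true then n+1 else pvBestN P n) = n+1
        have hPt : P (n+1) = true := by rw [hP]; simpa using hfit
        simp [hPt]
      rw [hb]
      simp
    · rw [if_neg hfit, ih]
      have hb : pvBestN P (n+1) = pvBestN P n := by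
        show (if P (n+1) = true then n+1 else pvBestN P n) = pvBestN P n
        have hPf : P (n+1) = false := by rw [hP]; simpa using hfit
        simp [hPf]
      rw [hb]

-- B's single pass computes the same greatest fitting count (and the running total)
theorem pvFold_eq (l : List String) (fixed max_len : Int) :
    (PySem.List.enumerate l 0).foldl (pvFitState max_len) (fixed, 0) =
      (fixed + pvCost l,
       (pvBestN (fun c => decide (fixed + pvCost (l.take c) ≤ max_len)) l.length : Int)) := by
  induction l using List.reverseRecOn with
  | nil => simp [PySem.List.enumerate, pvCost, pvBestN]
  | append_singleton l x ih =>
    rw [PySem.List.enumerate_append, List.foldl_append, ih]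
    have hen : PySem.List.enumerate [x] (0 + (l.length : Int)) = [((l.length : Int), x)] := by
      simp [PySem.List.enumerate]
    rw [hen]
    simp only [List.foldl_cons, List.foldl_nil, pvFitState]
    have hcost : fixed + pvCost l + 3 + PySem.Str.len x = fixed + pvCost (l ++ [x]) := by
      rw [pvCost_append]
      simp [pvCost]
      ring
    have hPQ : ∀ c, 1 ≤ c → c ≤ l.length →
        (fun c => decide (fixed + pvCost ((l ++ [x]).take c) ≤ max_len)) c
          = (fun c => decide (fixed + pvCost (l.take c) ≤ max_len)) c := by
      intro c _ hc
      simp only [List.take_append_of_le_length hc]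
    have hlen : (l ++ [x]).length = l.length + 1 := by simp
    by_cases hfit : fixed + pvCost l + 3 + PySem.Str.len x ≤ max_len
    · rw [if_pos hfit, hcost]
      have hb : pvBestN (fun c => decide (fixed + pvCost ((l ++ [x]).take c) ≤ max_len)) (l ++ [x]).length
          = l.length + 1 := by
        rw [hlen]
        show (if decide (fixed + pvCost ((l ++ [x]).take (l.length + 1)) ≤ max_len) = true
              then l.length + 1 else _) = l.length + 1
        have hTk : fixed + pvCost ((l ++ [x]).take (l.length + 1)) ≤ max_len := by
          rw [List.take_of_length_le (by simp), ← hcost]; exact hfit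
        simp [hTk]
      rw [hb]
      push_cast
      rfl
    · rw [if_neg hfit, hcost]
      have hb : pvBestN (fun c => decide (fixed + pvCost ((l ++ [x]).take c) ≤ max_len)) (l ++ [x]).length
          = pvBestN (fun c => decide (fixed + pvCost (l.take c) ≤ max_len)) l.length := by
        rw [hlen]
        show (if decide (fixed + pvCost ((l ++ [x]).take (l.length + 1)) ≤ max_len) = true
              then l.length + 1 else pvBestN _ l.length)
            = pvBestN (fun c => decide (fixed + pvCost (l.take c) ≤ max_len)) l.length
        have hTk : ¬ (fixed + pvCost ((l ++ [x]).take (l.length + 1)) ≤ max_len) := by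
          rw [List.take_of_length_le (by simp), ← hcost]; exact hfit
        simp only [hTk, decide_false, Bool.false_eq_true, if_false]
        exact pvBestN_congr _ _ _ hPQ
      rw [hb]

-- the two nonempty-highlights branches agree
theorem pvMain (base tail : String) (compact : List String) (max_len : Int) (hcne : compact ≠ []) :
    (match pvFitLoop base tail compact max_len (PySem.List.pyRange (compact.length : Int) 0 (-1)) with
      | some s => s
      | none => pvShortFallback base tail compact max_len)
    = (if 0 < ((PySem.List.enumerate compact 0).foldl (pvFitState max_len)
          (PySem.Str.len base + 13 + PySem.Str.len tail, 0)).2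
       then pvCandidate base tail compact
          ((PySem.List.enumerate compact 0).foldl (pvFitState max_len)
            (PySem.Str.len base + 13 + PySem.Str.len tail, 0)).2
       else pvShortFallback base tail compact max_len) := by
  rw [pvFitLoop_eq, pvFold_eq]
  have hPQ : pvBestN (fun c => decide (PySem.Str.len (pvCandidate base tail compact (c : Int)) ≤ max_len)) compact.length
      = pvBestN (fun c => decide (PySem.Str.len base + 13 + PySem.Str.len tail + pvCost (compact.take c) ≤ max_len)) compact.length := by
    apply pvBestN_congr
    intro c h1 _
    rw [pvCandidateLen base tail compact c h1 hcne]
  rw [hPQ]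
  cases hq : pvBestN (fun c => decide (PySem.Str.len base + 13 + PySem.Str.len tail + pvCost (compact.take c) ≤ max_len)) compact.length with
  | zero => simp
  | succ m =>
    simp

-- ===== VERDICT (by name: the statement is the Claim_ definition above) =====
theorem build_announcement_message_spec : Claim_equal_build_announcement_message := by
  intro project tag release_url highlights max_len _
  unfold Spec_build_announcement_message
  by_cases hhl : highlights = []
  · simp [build_announcement_message, build_announcement_message_alt, hhl]
  · have key := pvMain (project ++ " " ++ tag ++ " is out!")
      ("Full notes: " ++ release_url ++ " #proxmox #linux #homelab")
      (highlights.map pvCompactOne) max_len (by simpa using hhl)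
    simp only [build_announcement_message, build_announcement_message_alt, ne_eq, hhl,
      not_false_eq_true, if_true]
    exact key
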